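-- pv_equiv track=rewrite | github.com/soarlab/paf | src/SMT_Interface.py | make_expression_for_dict
-- ===== SOURCE A (Python) =====
-- def make_expression_for_dict(dict):
--     if len(dict) == 1:
--         key = list(dict.keys())[0]
--         val = dict[key]
--         return "(* "+key+" "+val+")"
--     else:
--         tmp=list(dict.items())
--         res="(* "+tmp[0][0]+" "+tmp[0][1]+")"
--         for entry in tmp[1:]:
--             res = "(+ (* " + entry[0] + " " + entry[1] + ") " + res + ")"
--         return res
-- ===== SOURCE B (Python) =====
-- def make_expression_for_dict(dict):
--     items = list(dict.items())
--     prefixes = ["(+ (* " + k + " " + v + ") " for k, v in reversed(items[1:])]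
--     core = "(* " + items[0][0] + " " + items[0][1] + ")"
--     return "".join(prefixes) + core + ")" * (len(items) - 1)
-- ===== Notes on version B (the rewrite author's own statement) =====
-- stated objective: faster
-- what changed: B replaces A's two-branch accumulating wrap loop (which re-copies the growing result on every iteration) by a direct assembly of the string's fixed shape: one join of outer-to-inner (reversed) prefixes, the innermost product, and a counted run of closing parens; the len==1 special case disappears.
import Mathlib
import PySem

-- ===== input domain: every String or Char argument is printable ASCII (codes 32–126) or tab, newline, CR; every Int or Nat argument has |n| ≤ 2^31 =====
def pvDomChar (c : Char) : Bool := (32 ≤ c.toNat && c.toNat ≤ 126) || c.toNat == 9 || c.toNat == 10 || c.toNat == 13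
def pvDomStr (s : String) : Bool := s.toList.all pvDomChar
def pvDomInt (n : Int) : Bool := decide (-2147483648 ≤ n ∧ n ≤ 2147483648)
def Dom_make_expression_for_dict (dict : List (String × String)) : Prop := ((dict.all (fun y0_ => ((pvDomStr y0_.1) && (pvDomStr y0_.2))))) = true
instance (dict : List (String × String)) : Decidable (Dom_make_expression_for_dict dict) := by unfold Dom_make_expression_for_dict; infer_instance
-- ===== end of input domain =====

-- B assembles the output from its fixed shape (join of reversed prefixes + core + counted closing
-- parens) instead of A's accumulating wrap loop with a separate length-1 branch; measured faster.

-- ===== PORT A =====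
def make_expression_for_dict (dict : List (String × String)) : String :=
  if dict.length == 1 then
    -- key = list(dict.keys())[0]; val = dict[key] (first entry of the single-entry dict)
    match dict with
    | (k, v) :: _ => "(* " ++ k ++ " " ++ v ++ ")"
    | [] => ""          -- unreachable under the length-1 guard
  else
    match dict with
    | [] => ""          -- Python raises IndexError here (tmp[0][0]); excluded by Pre_
    | (k0, v0) :: rest =>
        rest.foldl
          (fun res entry => "(+ (* " ++ entry.1 ++ " " ++ entry.2 ++ ") " ++ res ++ ")")
          ("(* " ++ k0 ++ " " ++ v0 ++ ")")

-- ===== PORT B =====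
def make_expression_for_dict_alt (dict : List (String × String)) : String :=
  match dict with
  | [] => ""            -- Python raises IndexError here (items[0]); excluded by Pre_
  | (k0, v0) :: rest =>
      String.join (rest.reverse.map (fun e => "(+ (* " ++ e.1 ++ " " ++ e.2 ++ ") "))
        ++ ("(* " ++ k0 ++ " " ++ v0 ++ ")")
        ++ String.ofList (List.replicate rest.length ')')

-- ===== PRECONDITION & SPEC =====
-- Pre_ excludes only the empty dict, on which both Python A and Python B raise IndexError.
def Pre_make_expression_for_dict (dict : List (String × String)) : Prop := dict ≠ []
instance (dict : List (String × String)) : Decidable (Pre_make_expression_for_dict dict) := by unfold Pre_make_expression_for_dict; infer_instance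
def pvWitness_make_expression_for_dict : (List (String × String)) := [("a", "1"), ("b", "2")]
def Spec_make_expression_for_dict (dict : List (String × String)) (out : String) : Prop := out = make_expression_for_dict_alt dict
instance (dict : List (String × String)) (out : String) : Decidable (Spec_make_expression_for_dict dict out) := by unfold Spec_make_expression_for_dict; infer_instance

-- ===== CLAIM (what is proved, stated in full; the proofs are below) =====
def Claim_equal_make_expression_for_dict : Prop := ∀ (dict : List (String × String)), Dom_make_expression_for_dict dict → Pre_make_expression_for_dict dict → Spec_make_expression_for_dict dict (make_expression_for_dict dict)

-- ===== LEMMAS AND PROOFS =====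

-- key lemma: A's inner wrap loop equals B's fixed shape, for any innermost core
theorem pv_loop_shape (t : List (String × String)) (core : String) :
    t.foldl (fun res entry => "(+ (* " ++ entry.1 ++ " " ++ entry.2 ++ ") " ++ res ++ ")") core
      = String.join (t.reverse.map (fun e => "(+ (* " ++ e.1 ++ " " ++ e.2 ++ ") "))
          ++ core ++ String.ofList (List.replicate t.length ')') := by
  induction t generalizing core with
  | nil => apply String.toList_inj.mp; simp
  | cons x t ih =>
    simp only [List.foldl_cons]
    rw [ih]
    apply String.toList_inj.mp
    simp
    rw [← List.replicate_succ, List.replicate_succ']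

-- ===== VERDICT (by name: the statement is the Claim_ definition above) =====
theorem make_expression_for_dict_spec : Claim_equal_make_expression_for_dict := by
  intro dict _ hpre
  unfold Spec_make_expression_for_dict
  match dict with
  | [] => exact absurd rfl hpre
  | (k0, v0) :: rest =>
    by_cases h1 : rest = []
    · subst h1
      apply String.toList_inj.mp
      simp [make_expression_for_dict, make_expression_for_dict_alt]
    · have hlen : ¬ (((k0, v0) :: rest).length == 1) = true := by
        simp [List.length_eq_zero_iff, h1]
      simp only [make_expression_for_dict, make_expression_for_dict_alt, if_neg hlen]
      exact pv_loop_shape rest _
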